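-- pv_equiv track=rewrite | github.com/McGill-NLP/weblinx | weblinx/processing/outputs.py | find_last_non_alphanum_char
-- ===== SOURCE A (Python) =====
-- def find_last_non_alphanum_char(s, other_chars_allowed: list = None):
--     """
--     Given a string and a list of characters, find the last index of a non-alphanumeric character in the string.
--     """
--     if other_chars_allowed is None:
--         other_chars_allowed = []
--     other_chars_allowed = set(other_chars_allowed)
--
--     for i in range(len(s) - 1, -1, -1):
--         if not (s[i].isalnum() or s[i] in other_chars_allowed):
--             return i
--     return -1
-- ===== SOURCE B (Python) =====
-- def find_last_non_alphanum_char(s, other_chars_allowed: list = None):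
--     """
--     Given a string and a list of characters, find the last index of a non-alphanumeric character in the string.
--     """
--     if other_chars_allowed is None:
--         other_chars_allowed = []
--     allowed = set(other_chars_allowed)
--     last = -1
--     for i, ch in enumerate(s):
--         if not (ch.isalnum() or ch in allowed):
--             last = i
--     return last
-- ===== Notes on version B (the rewrite author's own statement) =====
-- stated objective: alternative
-- what changed: Replaces the reverse early-exit index scan with a single forward pass over enumerate(s) that keeps an accumulator holding the most recent disallowed index and returns it at the end.
import Mathlib
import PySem

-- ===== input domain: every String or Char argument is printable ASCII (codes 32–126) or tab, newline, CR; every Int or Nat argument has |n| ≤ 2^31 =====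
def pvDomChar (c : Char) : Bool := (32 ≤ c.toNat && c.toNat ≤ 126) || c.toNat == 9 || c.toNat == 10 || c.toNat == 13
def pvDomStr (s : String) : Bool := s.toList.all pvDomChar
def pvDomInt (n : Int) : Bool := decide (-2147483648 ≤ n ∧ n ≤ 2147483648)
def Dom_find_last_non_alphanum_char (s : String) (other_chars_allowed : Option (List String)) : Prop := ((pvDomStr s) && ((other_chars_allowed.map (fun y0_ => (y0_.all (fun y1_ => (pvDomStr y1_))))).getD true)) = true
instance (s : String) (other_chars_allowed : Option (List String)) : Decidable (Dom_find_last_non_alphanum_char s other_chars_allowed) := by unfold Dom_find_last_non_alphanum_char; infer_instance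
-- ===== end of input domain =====

-- ===== PORT A =====
-- B differs from A: forward full pass with a 'last' accumulator instead of A's reverse early-exit scan (objective: alternative decomposition).
-- reverse loop 'for i in range(len(s)-1, -1, -1): if bad: return i', as recursion on the current index + 1
def pvLoopA (cs : List Char) (allowed : PySem.Set String) : Nat → Int
  | 0 => -1
  | Nat.succ i =>
      if !(PySem.Chars.isalnum (cs.getD i ' ') || PySem.Set.contains allowed (String.ofList [cs.getD i ' '])) then
        (i : Int)
      else
        pvLoopA cs allowed i

def find_last_non_alphanum_char (s : String) (other_chars_allowed : Option (List String)) : Int :=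
  let other := other_chars_allowed.getD []
  let allowed := PySem.Set.ofList other
  pvLoopA s.toList allowed s.toList.length

-- ===== PORT B =====
def find_last_non_alphanum_char_alt (s : String) (other_chars_allowed : Option (List String)) : Int :=
  let other := other_chars_allowed.getD []
  let allowed := PySem.Set.ofList other
  (PySem.List.enumerate s.toList 0).foldl
    (fun last p =>
      if !(PySem.Chars.isalnum p.2 || PySem.Set.contains allowed (String.ofList [p.2])) then p.1 else last)
    (-1)

-- ===== PRECONDITION & SPEC =====
def Spec_find_last_non_alphanum_char (s : String) (other_chars_allowed : Option (List String)) (out : Int) : Prop := out = find_last_non_alphanum_char_alt s other_chars_allowed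
instance (s : String) (other_chars_allowed : Option (List String)) (out : Int) : Decidable (Spec_find_last_non_alphanum_char s other_chars_allowed out) := by unfold Spec_find_last_non_alphanum_char; infer_instance

-- ===== CLAIM (what is proved, stated in full; the proofs are below) =====
def Claim_equal_find_last_non_alphanum_char : Prop := ∀ (s : String) (other_chars_allowed : Option (List String)), Dom_find_last_non_alphanum_char s other_chars_allowed → Spec_find_last_non_alphanum_char s other_chars_allowed (find_last_non_alphanum_char s other_chars_allowed)

-- ===== LEMMAS AND PROOFS =====

-- the reverse scan up to index n equals the forward accumulator pass over the first n characters
theorem pvLoopA_eq_foldl (cs : List Char) (al : PySem.Set String) :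
    ∀ n, n ≤ cs.length →
      pvLoopA cs al n =
        (PySem.List.enumerate (cs.take n) 0).foldl
          (fun last p =>
            if !(PySem.Chars.isalnum p.2 || PySem.Set.contains al (String.ofList [p.2])) then p.1 else last)
          (-1) := by
  intro n
  induction n with
  | zero => intro _; simp [pvLoopA]
  | succ i ih =>
      intro h
      have hi : i < cs.length := Nat.lt_of_succ_le h
      have htake : cs.take (i + 1) = cs.take i ++ [cs[i]] :=
        List.take_succ_eq_append_getElem hi
      rw [pvLoopA, htake, PySem.List.enumerate_append, List.foldl_append,
        ← ih (Nat.le_of_lt hi)]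
      have hgetD : cs.getD i ' ' = cs[i] := List.getD_eq_getElem cs ' ' hi
      have hlen : (cs.take i).length = i := List.length_take_of_le (Nat.le_of_lt hi)
      simp only [hgetD, hlen, PySem.List.enumerate, List.foldl_cons, List.foldl_nil]
      split_ifs with hb
      · simp
      · rfl

-- ===== VERDICT (by name: the statement is the Claim_ definition above) =====
theorem find_last_non_alphanum_char_spec : Claim_equal_find_last_non_alphanum_char := by
  intro s oca _
  unfold Spec_find_last_non_alphanum_char find_last_non_alphanum_char find_last_non_alphanum_char_alt
  rw [pvLoopA_eq_foldl _ _ _ (Nat.le_refl _), List.take_length]
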